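-- pv_equiv track=rewrite | github.com/JHyuk2/Hyuk2Coding | SWAG/D3/1220.py | count_deadlock
-- ===== SOURCE A (Python) =====
-- def count_deadlock(new_tmp):
--     result = 0
--     #
--     tmp = ''
--     for i in new_tmp:
--         if i == 0:
--             tmp += ' '
--         elif i == 1:
--             tmp += '1'
--         else:
--             tmp += '2'
--
--     # 셀 수 있는 게 하나라도 있으면 무한 반복.
--     while tmp.count('12') != 0:
--         cnt_12 = 0
--         cnt_12 = tmp.count('12')
--         tmp = tmp.replace('12', ' ', cnt_12)
--
--         result += cnt_12
--
--     return result
-- ===== SOURCE B (Python) =====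
-- def count_deadlock(new_tmp):
--     result = 0
--     prev = None
--     for i in new_tmp:
--         if prev == 1 and i != 0 and i != 1:
--             result += 1
--         prev = i
--     return result
-- ===== Notes on version B (the rewrite author's own statement) =====
-- stated objective: simpler
-- what changed: Replaces the encode-to-string plus count/replace while-loop with a single pass over the list that keeps the previous element and counts positions where the previous element is 1 and the current is neither 0 nor 1 (the non-overlapping '12' adjacencies); no string is built.
import Mathlib
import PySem

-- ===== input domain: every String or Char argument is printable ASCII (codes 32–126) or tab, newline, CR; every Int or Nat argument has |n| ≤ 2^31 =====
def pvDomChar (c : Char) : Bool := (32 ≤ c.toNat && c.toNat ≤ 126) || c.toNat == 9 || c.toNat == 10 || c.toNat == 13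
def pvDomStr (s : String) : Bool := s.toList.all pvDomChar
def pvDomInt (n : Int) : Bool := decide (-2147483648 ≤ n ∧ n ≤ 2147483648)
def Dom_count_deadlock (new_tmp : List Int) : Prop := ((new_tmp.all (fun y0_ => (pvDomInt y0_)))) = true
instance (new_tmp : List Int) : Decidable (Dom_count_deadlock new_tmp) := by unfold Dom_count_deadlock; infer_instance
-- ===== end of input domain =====

-- B replaces A's string-encode + count/replace while-loop by a single pass over the list
-- keeping the previous element (objective: simpler); return values agree on all inputs.


-- ===== PORT A =====
-- hand port of tmp.replace('12', ' ', n) for this fixed pattern/replacement (exact here: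
-- left-to-right scan, at most n leftmost non-overlapping occurrences of "12" become " ")
def pvRepl12 : List Char → Nat → List Char
  | s, 0 => s
  | [], _ + 1 => []
  | '1' :: '2' :: rest, n + 1 => ' ' :: pvRepl12 rest n
  | c :: rest, n + 1 => c :: pvRepl12 rest (n + 1)

-- A's while-loop, with fuel tmp.length + 1 (enough: the fuel-0 arm is never reached,
-- proved below via pcount_pvRepl12)
def pvWhileA : Nat → List Char → Int → Int
  | 0, _, result => result
  | fuel + 1, tmp, result =>
    if PySem.Chars.count tmp ['1', '2'] ≠ 0 then
      pvWhileA fuel (pvRepl12 tmp (PySem.Chars.count tmp ['1', '2']))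
        (result + (PySem.Chars.count tmp ['1', '2'] : Int))
    else result

def count_deadlock (new_tmp : List Int) : Int :=
  let result : Int := 0
  let tmp : List Char :=
    new_tmp.foldl (fun t i => t ++ [if i = 0 then ' ' else if i = 1 then '1' else '2']) []
  pvWhileA (tmp.length + 1) tmp result

-- ===== PORT B =====
def count_deadlock_alt (new_tmp : List Int) : Int :=
  (new_tmp.foldl
    (fun (s : Option Int × Int) i =>
      (some i, if s.1 = some 1 ∧ i ≠ 0 ∧ i ≠ 1 then s.2 + 1 else s.2))
    (none, 0)).2

-- ===== PRECONDITION & SPEC =====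
def Spec_count_deadlock (new_tmp : List Int) (out : Int) : Prop := out = count_deadlock_alt new_tmp
instance (new_tmp : List Int) (out : Int) : Decidable (Spec_count_deadlock new_tmp out) := by unfold Spec_count_deadlock; infer_instance

-- ===== CLAIM (what is proved, stated in full; the proofs are below) =====
def Claim_equal_count_deadlock : Prop := ∀ (new_tmp : List Int), Dom_count_deadlock new_tmp → Spec_count_deadlock new_tmp (count_deadlock new_tmp)

-- ===== LEMMAS AND PROOFS =====

-- number of non-overlapping '12' occurrences, greedily left to right
def pcount : List Char → Nat
  | '1' :: '2' :: r => pcount r + 1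
  | _ :: r => pcount r
  | [] => 0

def encF (i : Int) : Char := if i = 0 then ' ' else if i = 1 then '1' else '2'

def encOpt : Option Int → List Char
  | none => []
  | some i => [encF i]

lemma pcount_cons_of_no_pair (c : Char) (l : List Char)
    (h : ¬(c = '1' ∧ l.head? = some '2')) : pcount (c :: l) = pcount l := by
  rw [pcount.eq_def]
  split
  · rename_i r heq
    injection heq with h1 h2
    exact absurd ⟨h1, by rw [h2]; rfl⟩ h
  · rename_i x r heq
    injection heq with h1 h2
    rw [h2]
  · rename_i heq; exact absurd heq (by simp)

lemma countGo_eq_pcount : ∀ (fuel : Nat) (l : List Char) (acc : Nat),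
    l.length ≤ fuel → PySem.Chars.count.go ['1', '2'] fuel l acc = acc + pcount l := by
  intro fuel
  induction fuel with
  | zero => intro l acc h; rw [List.length_eq_zero_iff.mp (Nat.le_zero.mp h)]; rfl
  | succ n ih =>
    intro l acc h
    match l with
    | [] => rfl
    | a :: t =>
      rw [PySem.Chars.count.go]
      by_cases hp : List.isPrefixOf ['1','2'] (a :: t) = true
      · rw [if_pos hp]
        match a, t, hp with
        | _, [], hp => simp [List.isPrefixOf] at hp
        | _, b :: t', hp =>
          simp [List.isPrefixOf] at hp
          obtain ⟨h1, h2⟩ := hp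
          subst h1; subst h2
          rw [ih _ _ (by simp at h ⊢; omega)]
          show acc + 1 + pcount t' = acc + pcount ('1' :: '2' :: t')
          rw [pcount]
          omega
      · rw [if_neg hp]
        rw [ih _ _ (Nat.le_of_succ_le_succ (by simpa using h))]
        rw [pcount_cons_of_no_pair]
        intro ⟨h1, h2⟩
        apply hp
        subst h1
        cases t with
        | nil => simp at h2
        | cons b t' => simp at h2; subst h2; simp [List.isPrefixOf]

lemma count_eq_pcount (l : List Char) : PySem.Chars.count l ['1', '2'] = pcount l := by
  rw [PySem.Chars.count]
  rw [if_neg (by simp)]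
  rw [countGo_eq_pcount _ _ _ (le_refl _)]
  omega

lemma pvRepl12_cons_of_no_pair (c : Char) (r : List Char) (m : Nat)
    (h : ¬(c = '1' ∧ r.head? = some '2')) :
    pvRepl12 (c :: r) (m + 1) = c :: pvRepl12 r (m + 1) := by
  rw [pvRepl12.eq_def]
  split
  · rename_i hn; omega
  · rename_i hl hn; exact absurd hl (by simp)
  · rename_i hl hn
    injection hl with e1 e2
    exact absurd ⟨e1, by rw [e2]; rfl⟩ h
  · rename_i hg hl hn
    injection hl with e1 e2
    subst e1; subst e2
    injection hn with e3
    rw [e3]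

lemma head?_pvRepl12_ne_two (l : List Char) (n : Nat) (h : l.head? ≠ some '2') :
    (pvRepl12 l n).head? ≠ some '2' := by
  rw [pvRepl12.eq_def]
  split
  · exact h
  · simp
  · simp
  · rename_i c rest m hne
    simpa using h

lemma pcount_pvRepl12 : ∀ (l : List Char) (n : Nat), pcount (pvRepl12 l n) = pcount l - n := by
  intro l
  induction l using pcount.induct with
  | case1 r ih =>
    intro n
    match n with
    | 0 => simp [pvRepl12]
    | m + 1 =>
      rw [pvRepl12]
      rw [pcount_cons_of_no_pair _ _ (by rintro ⟨h1, _⟩; exact absurd h1 (by decide))]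
      rw [ih m, pcount]
      omega
  | case2 c r hne ih =>
    intro n
    match n with
    | 0 => simp [pvRepl12]
    | m + 1 =>
      have hnp : ¬(c = '1' ∧ r.head? = some '2') := by
        rintro ⟨h1, h2⟩
        cases r with
        | nil => simp at h2
        | cons b t =>
          simp at h2
          exact hne t h1 (by rw [h2])
      have hnp2 : ¬(c = '1' ∧ (pvRepl12 r (m+1)).head? = some '2') := by
        rintro ⟨h1, h2⟩
        exact head?_pvRepl12_ne_two r (m+1) (fun hh => hnp ⟨h1, hh⟩) h2
      rw [pvRepl12_cons_of_no_pair c r m hnp]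
      rw [pcount_cons_of_no_pair _ _ hnp2]
      rw [ih (m+1), pcount_cons_of_no_pair _ _ hnp]
  | case3 =>
    intro n; cases n with
    | zero => rfl
    | succ m => simp [pvRepl12, pcount]

lemma pcount_singleton (c : Char) : pcount [c] = 0 := by
  rw [pcount_cons_of_no_pair c [] (by simp)]; rfl

lemma foldB_eq_pcount : ∀ (xs : List Int) (p : Option Int) (r : Int),
    (xs.foldl
      (fun (s : Option Int × Int) i =>
        (some i, if s.1 = some 1 ∧ i ≠ 0 ∧ i ≠ 1 then s.2 + 1 else s.2)) (p, r)).2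
    = r + pcount (encOpt p ++ xs.map encF) := by
  intro xs
  induction xs with
  | nil =>
    intro p r
    cases p with
    | none => simp [encOpt, pcount]
    | some i => simp [encOpt, pcount_singleton]
  | cons i xs ih =>
    intro p r
    rw [List.foldl_cons, ih]
    by_cases hcond : p = some 1 ∧ i ≠ 0 ∧ i ≠ 1
    · obtain ⟨hp, hi0, hi1⟩ := hcond
      subst hp
      rw [if_pos ⟨rfl, hi0, hi1⟩]
      have he : encF i = '2' := by simp [encF, hi0, hi1]
      simp only [encOpt, List.map_cons, he, List.cons_append, List.nil_append]
      show r + 1 + (pcount ('2' :: List.map encF xs) : Int)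
        = r + (pcount (encF 1 :: '2' :: List.map encF xs) : Int)
      rw [pcount_cons_of_no_pair '2' _ (by simp)]
      have : encF 1 = '1' := by simp [encF]
      rw [this]
      rw [show pcount ('1' :: '2' :: List.map encF xs) = pcount (List.map encF xs) + 1 from rfl]
      push_cast; ring
    · rw [if_neg hcond]
      cases p with
      | none => simp [encOpt]
      | some j =>
        simp only [encOpt, List.map_cons, List.cons_append, List.nil_append]
        rw [pcount_cons_of_no_pair (encF j) _ ?_]
        rintro ⟨h1, h2⟩
        simp only [List.head?_cons] at h2
        have hj : j = 1 := by
          by_contra hj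
          simp [encF, hj] at h1
          split_ifs at h1 <;> simp_all
        have hni : ¬(i ≠ 0 ∧ i ≠ 1) := fun hh => hcond ⟨by rw [hj], hh⟩
        push Not at hni
        by_cases hi : i = 0
        · simp [encF, hi] at h2
        · have := hni hi
          simp [encF, this] at h2

lemma whileA_eq (L : List Char) :
    pvWhileA (L.length + 1) L 0 = (pcount L : Int) := by
  by_cases h0 : pcount L = 0
  · rw [pvWhileA, count_eq_pcount]
    simp [h0]
  · cases L with
    | nil => simp [pcount] at h0
    | cons c t =>
      rw [pvWhileA, count_eq_pcount, if_pos h0]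
      simp only [List.length_cons]
      rw [pvWhileA, count_eq_pcount, pcount_pvRepl12, Nat.sub_self]
      simp

-- ===== VERDICT (by name: the statement is the Claim_ definition above) =====
theorem count_deadlock_spec : Claim_equal_count_deadlock := by
  intro new_tmp _
  show count_deadlock new_tmp = count_deadlock_alt new_tmp
  unfold count_deadlock count_deadlock_alt
  rw [foldB_eq_pcount]
  show _ = 0 + (pcount ([] ++ new_tmp.map encF) : Int)
  rw [List.nil_append, zero_add]
  rw [PySem.List.foldl_append_singleton_eq_map, List.nil_append]
  exact whileA_eq (new_tmp.map encF)
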